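-- pv_equiv track=rewrite | github.com/eliottcassidy2000/math | 04-computation/f_poly_character_theory.py | eulerian_poly
-- ===== SOURCE A (Python) =====
-- def eulerian_poly(n):
--     """Compute Eulerian polynomial coefficients A(n,0), A(n,1), ..., A(n,n-1)."""
--     A = [0] * n
--     A[0] = 1
--     for i in range(1, n):
--         new_A = [0] * n
--         for k in range(n):
--             new_A[k] = (k+1) * A[k] + (i - k) * (A[k-1] if k > 0 else 0)
--         A = new_A
--     return A
-- ===== SOURCE B (Python) =====
-- def eulerian_poly(n):
--     """Compute Eulerian polynomial coefficients A(n,0), A(n,1), ..., A(n,n-1)."""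
--     # Closed form A(n-1,k) = sum_{j<=k} (-1)^j C(n,j) (k+1-j)^(n-1), evaluated as
--     # the n-fold finite difference of the power sequence (p+1)^(n-1), i.e. the
--     # coefficients of (1-x)^n * sum_p (p+1)^(n-1) x^p.  No DP recurrence state.
--     m = n - 1
--     c = [(p + 1) ** m for p in range(n)]
--     for _ in range(n):
--         for i in range(n - 1, 0, -1):
--             c[i] -= c[i - 1]
--     return c
-- ===== Notes on version B (the rewrite author's own statement) =====
-- stated objective: alternative
-- what changed: Replaces the weighted row-to-row Eulerian DP recurrence by evaluating the closed form A(n-1,k) = sum_{j<=k} (-1)^j C(n,j) (k+1-j)^(n-1) as the n-fold finite difference of the power sequence (p+1)^(n-1) (the coefficients of (1-x)^n * sum_p (p+1)^(n-1) x^p): only subtractions of adjacent entries, no multiplicative recurrence state.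
-- outside the precondition, e.g. on eulerian_poly(0): A raises IndexError, B returns []; on eulerian_poly(-1): A raises IndexError, B returns []
import Mathlib
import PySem

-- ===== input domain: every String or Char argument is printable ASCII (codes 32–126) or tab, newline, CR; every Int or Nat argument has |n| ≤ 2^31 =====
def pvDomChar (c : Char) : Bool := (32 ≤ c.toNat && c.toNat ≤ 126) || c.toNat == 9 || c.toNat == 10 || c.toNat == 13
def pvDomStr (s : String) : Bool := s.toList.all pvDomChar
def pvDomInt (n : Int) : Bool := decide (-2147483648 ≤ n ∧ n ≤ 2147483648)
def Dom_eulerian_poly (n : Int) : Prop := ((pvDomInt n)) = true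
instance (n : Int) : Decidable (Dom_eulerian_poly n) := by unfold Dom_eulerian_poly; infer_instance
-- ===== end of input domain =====

-- B replaces A's row-to-row dynamic programming by the independent closed-form
-- alternating sum A(n-1,k) = Σ_{j≤k} (-1)^j C(n,j) (k+1-j)^(n-1) (objective: alternative).

-- ===== PORT A =====
-- A = [0]*n; A[0] = 1 raises IndexError for n ≤ 0 (excluded by Pre_); there List.set is a no-op.
-- Index accesses A[k], A[k-1] are always in range inside Pre_, so pyGetD _ _ 0 is exact there.
def eulerian_poly (n : Int) : List Int :=
  let A0 := (List.replicate n.toNat (0 : Int)).set 0 1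
  (PySem.List.pyRange 1 n 1).foldl (fun A i =>
    (PySem.List.pyRange 0 n 1).foldl (fun newA k =>
      newA.set k.toNat ((k + 1) * PySem.List.pyGetD A k 0 +
        (i - k) * (if 0 < k then PySem.List.pyGetD A (k - 1) 0 else 0)))
      (List.replicate n.toNat (0 : Int))) A0

-- ===== PORT B =====
-- (p + 1) ** m with nonnegative exponent: ported as ^ m.toNat (the loop only runs when n ≥ 1, so
-- m = n - 1 ≥ 0; for n ≤ 0 every loop is empty).  'c[i] -= c[i-1]' is List.set of the difference;
-- the indices i, i-1 are always in range, so pyGetD _ _ 0 is exact there.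
def eulerian_poly_alt (n : Int) : List Int :=
  let m := n - 1
  let c0 := (PySem.List.pyRange 0 n 1).foldl (fun ps p => ps ++ [(p + 1) ^ m.toNat]) []
  (PySem.List.pyRange 0 n 1).foldl (fun c _ =>
    (PySem.List.pyRange (n - 1) 0 (-1)).foldl (fun c i =>
      c.set i.toNat (PySem.List.pyGetD c i 0 - PySem.List.pyGetD c (i - 1) 0)) c) c0

-- ===== PRECONDITION & SPEC =====
-- Pre_: the Python A executes 'A[0] = 1' on the list [0]*n, which raises IndexError for every n ≤ 0.
def Pre_eulerian_poly (n : Int) : Prop := 1 ≤ n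
instance (n : Int) : Decidable (Pre_eulerian_poly n) := by unfold Pre_eulerian_poly; infer_instance
def pvWitness_eulerian_poly : Int := (4)

def Spec_eulerian_poly (n : Int) (out : List Int) : Prop := out = eulerian_poly_alt n
instance (n : Int) (out : List Int) : Decidable (Spec_eulerian_poly n out) := by unfold Spec_eulerian_poly; infer_instance

-- ===== CLAIM (what is proved, stated in full; the proofs are below) =====
def Claim_equal_eulerian_poly : Prop := ∀ (n : Int), Dom_eulerian_poly n → Pre_eulerian_poly n → Spec_eulerian_poly n (eulerian_poly n)

-- ===== LEMMAS AND PROOFS =====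

-- The closed form, as Finset sums.  Wsum a e L B = sum_{j<L} (-1)^j C(a,j) (B-j)^e;  S m k = A(m,k).
def Wsum (a e L : Nat) (B : Int) : Int :=
  ∑ j ∈ Finset.range L, (-1) ^ j * (Nat.choose a j : Int) * (B - j) ^ e
def Jsum (a e L : Nat) (B : Int) : Int :=
  ∑ j ∈ Finset.range L, (-1) ^ j * (j : Int) * (Nat.choose a j : Int) * (B - j) ^ e
def S (m k : Nat) : Int := Wsum (m + 1) m (k + 1) ((k : Int) + 1)
def rowF (m nn : Nat) : List Int := (List.range nn).map (fun k => S m k)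

-- Pascal split of the leading choose index.
lemma Wsum_succ_a (a e L : Nat) (B : Int) :
    Wsum (a + 1) e (L + 1) B = Wsum a e (L + 1) B - Wsum a e L (B - 1) := by
  unfold Wsum
  rw [Finset.sum_range_succ' (fun j => (-1) ^ j * (Nat.choose (a+1) j : Int) * (B - j) ^ e) L,
      Finset.sum_range_succ' (fun j => (-1) ^ j * (Nat.choose a j : Int) * (B - j) ^ e) L]
  have hX : ∑ x ∈ Finset.range L, (-1 : Int) ^ (x + 1) * (Nat.choose (a+1) (x+1) : Int) * (B - (x + 1 : Nat)) ^ e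
      = ∑ x ∈ Finset.range L, ((-1 : Int) ^ (x + 1) * (Nat.choose a (x+1) : Int) * (B - (x + 1 : Nat)) ^ e
          - (-1 : Int) ^ x * (Nat.choose a x : Int) * (B - 1 - x) ^ e) := by
    apply Finset.sum_congr rfl
    intro x _
    rw [Nat.choose_succ_succ']
    have hb : B - ((x + 1 : Nat) : Int) = B - 1 - x := by push_cast; ring
    rw [hb]
    push_cast
    ring
  rw [hX, Finset.sum_sub_distrib]
  simp
  ring

-- Absorption j*C(a+1,j) = (a+1)*C(a,j-1).
lemma Jsum_succ (a e L : Nat) (B : Int) :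
    Jsum (a + 1) e (L + 1) B = -((a : Int) + 1) * Wsum a e L (B - 1) := by
  unfold Jsum Wsum
  rw [Finset.sum_range_succ' (fun j => (-1) ^ j * (j : Int) * (Nat.choose (a+1) j : Int) * (B - j) ^ e) L]
  have hX : ∑ x ∈ Finset.range L, (-1 : Int) ^ (x + 1) * ((x + 1 : Nat) : Int) * (Nat.choose (a+1) (x+1) : Int) * (B - (x + 1 : Nat)) ^ e
      = ∑ x ∈ Finset.range L, (-((a : Int) + 1)) * ((-1 : Int) ^ x * (Nat.choose a x : Int) * (B - 1 - x) ^ e) := by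
    apply Finset.sum_congr rfl
    intro x _
    have habs : ((x + 1 : Nat) : Int) * (Nat.choose (a+1) (x+1) : Int) = ((a : Int) + 1) * (Nat.choose a x : Int) := by
      have hnat : (x + 1) * Nat.choose (a+1) (x+1) = (a + 1) * Nat.choose a x := by
        have h := Nat.add_one_mul_choose_eq a x
        rw [h]
        exact Nat.mul_comm _ _
      exact_mod_cast congrArg (fun t : Nat => (t : Int)) hnat
    have hb : B - ((x + 1 : Nat) : Int) = B - 1 - x := by push_cast; ring
    rw [hb]
    calc (-1 : Int) ^ (x + 1) * ((x + 1 : Nat) : Int) * (Nat.choose (a+1) (x+1) : Int) * (B - 1 - x) ^ e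
        = (-1 : Int) ^ (x + 1) * (((x + 1 : Nat) : Int) * (Nat.choose (a+1) (x+1) : Int)) * (B - 1 - x) ^ e := by ring
      _ = (-1 : Int) ^ (x + 1) * (((a : Int) + 1) * (Nat.choose a x : Int)) * (B - 1 - x) ^ e := by rw [habs]
      _ = (-((a : Int) + 1)) * ((-1 : Int) ^ x * (Nat.choose a x : Int) * (B - 1 - x) ^ e) := by ring
  rw [hX, ← Finset.mul_sum]
  simp

-- Splitting one factor (B - j) off the power.
lemma Wsum_succ_e (a e L : Nat) (B : Int) :
    Wsum a (e + 1) L B = B * Wsum a e L B - Jsum a e L B := by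
  unfold Wsum Jsum
  rw [Finset.mul_sum, ← Finset.sum_sub_distrib]
  apply Finset.sum_congr rfl
  intro t _
  ring

lemma S_zero_left (m : Nat) : S m 0 = 1 := by
  unfold S Wsum
  simp

lemma Wsum_one_zero (L : Nat) (B : Int) : Wsum 1 0 (L + 2) B = 0 := by
  induction L with
  | zero => unfold Wsum; simp [Finset.sum_range_succ]
  | succ t ih =>
      unfold Wsum at ih ⊢
      rw [Finset.sum_range_succ]
      rw [ih]
      have : Nat.choose 1 (t + 2) = 0 := by
        apply Nat.choose_eq_zero_of_lt; omega
      simp [this]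

lemma S_zero_row (k : Nat) : S 0 (k + 1) = 0 := by
  unfold S
  exact Wsum_one_zero k _

-- The Eulerian recurrence satisfied by the closed form.
lemma S_rec (m k : Nat) :
    S (m + 1) (k + 1) = ((k : Int) + 2) * S m (k + 1) + ((m : Int) - (k : Int)) * S m k := by
  unfold S
  have h0 : ((k + 1 : Nat) : Int) + 1 = (k : Int) + 2 := by push_cast; ring
  rw [h0]
  have h1 := Wsum_succ_a (m + 1) (m + 1) (k + 1) ((k : Int) + 2)
  have h2 := Wsum_succ_e (m + 1) m (k + 2) ((k : Int) + 2)
  have h3 := Jsum_succ m m (k + 1) ((k : Int) + 2)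
  have h4 := Wsum_succ_e (m + 1) m (k + 1) ((k : Int) + 1)
  have h5 := Jsum_succ m m k ((k : Int) + 1)
  have h6 := Wsum_succ_a m m k ((k : Int) + 1)
  have e1 : ((k : Int) + 2) - 1 = (k : Int) + 1 := by ring
  have e2 : ((k : Int) + 1) - 1 = (k : Int) := by ring
  rw [e1] at h1 h3
  rw [e2] at h5 h6
  linear_combination h1 + h2 - h3 - h4 + h5 + (-((m : Int) + 1)) * h6

-- lists: writing v at the length of the prefix
lemma set_append_len (xs ys : List Int) (v y : Int) :
    (xs ++ y :: ys).set xs.length v = xs ++ v :: ys := by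
  rw [List.set_append]
  simp

-- the inner 'for k in range(n): new_A[k] = g(k)' loop fills the fresh list with g
lemma foldl_set_aux (g : Int → Int) :
    ∀ (t : Nat) (l : List Int), t ≤ l.length →
      ((List.range t).map (fun j : Nat => (j : Int))).foldl (fun acc k => acc.set k.toNat (g k)) l
        = ((List.range t).map (fun j : Nat => g (j : Int))) ++ l.drop t := by
  intro t
  induction t with
  | zero => intro l _; simp
  | succ t ih =>
      intro l hl
      rw [List.range_succ, List.map_append, List.map_append]
      rw [List.foldl_append, ih l (by omega)]
      simp only [List.map_cons, List.map_nil, List.foldl_cons, List.foldl_nil]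
      have ht : ((t : Int)).toNat = t := by simp
      rw [ht]
      have hdrop : l.drop t = l[t]'(by omega) :: l.drop (t + 1) := (List.getElem_cons_drop (by omega)).symm
      rw [hdrop]
      have hset := set_append_len ((List.range t).map (fun j : Nat => g (j : Int))) (l.drop (t + 1)) (g t) (l[t]'(by omega))
      rw [List.length_map, List.length_range] at hset
      rw [hset]
      simp

lemma foldl_set_range (g : Int → Int) (nn : Nat) :
    (PySem.List.pyRange 0 (nn : Int) 1).foldl (fun acc k => acc.set k.toNat (g k)) (List.replicate nn (0 : Int))
      = (List.range nn).map (fun j : Nat => g (j : Int)) := by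
  rw [PySem.List.pyRange_zero_natCast]
  rw [foldl_set_aux g nn (List.replicate nn 0) (by simp)]
  simp

lemma rowF_getD (m nn t : Nat) (h : t < nn) :
    PySem.List.pyGetD (rowF m nn) ((t : Nat) : Int) 0 = S m t := by
  rw [rowF, PySem.List.pyGetD_natCast]
  rw [List.getD_eq_getElem?_getD]
  simp [h]

lemma init_rowF (nn : Nat) : (List.replicate nn (0 : Int)).set 0 1 = rowF 0 nn := by
  cases nn with
  | zero => simp [rowF]
  | succ t =>
      rw [rowF, List.range_succ_eq_map, List.replicate_succ]
      simp only [List.set_cons_zero, List.map_cons, List.map_map]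
      rw [S_zero_left]
      congr 1
      symm
      have h2 : (List.range t).map ((fun k => S 0 k) ∘ Nat.succ)
          = List.replicate ((List.range t).map ((fun k => S 0 k) ∘ Nat.succ)).length (0 : Int) := by
        apply List.eq_replicate_of_mem
        intro b hb
        simp only [List.mem_map, Function.comp] at hb
        obtain ⟨j, _, rfl⟩ := hb
        exact S_zero_row j
      simp only [List.length_map, List.length_range] at h2
      exact h2

-- one DP step maps the closed-form row of order m to the row of order m+1
lemma step_rowF (nn m : Nat) :
    (List.range nn).map (fun j : Nat => ((j : Int) + 1) * PySem.List.pyGetD (rowF m nn) (j : Int) 0 +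
        (((m : Int) + 1) - (j : Int)) *
          (if 0 < (j : Int) then PySem.List.pyGetD (rowF m nn) ((j : Int) - 1) 0 else 0))
      = rowF (m + 1) nn := by
  conv_rhs => rw [rowF]
  apply List.map_congr_left
  intro j hj
  have hjn : j < nn := List.mem_range.mp hj
  cases j with
  | zero =>
      simp only [Nat.cast_zero]
      have h0 := rowF_getD m nn 0 hjn
      rw [Nat.cast_zero] at h0
      rw [h0, S_zero_left, S_zero_left]
      norm_num
  | succ t =>
      have hc : ((t + 1 : Nat) : Int) = (t : Int) + 1 := by push_cast; ring
      rw [hc, if_pos (by positivity)]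
      have hc2 : ((t : Int) + 1 - 1) = ((t : Nat) : Int) := by ring
      rw [hc2]
      have h1 : PySem.List.pyGetD (rowF m nn) ((t : Int) + 1) 0 = S m (t + 1) := by
        rw [← hc]; exact rowF_getD m nn (t + 1) hjn
      rw [h1, rowF_getD m nn t (by omega)]
      rw [S_rec m t]
      ring

-- A's outer loop: after folding range(1, t+1) the row is the closed-form row of order t
lemma outer_fold (nn : Nat) (t : Nat) :
    (PySem.List.pyRange 1 ((t : Int) + 1) 1).foldl (fun A i =>
      (PySem.List.pyRange 0 (nn : Int) 1).foldl (fun newA k =>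
        newA.set k.toNat ((k + 1) * PySem.List.pyGetD A k 0 +
          (i - k) * (if 0 < k then PySem.List.pyGetD A (k - 1) 0 else 0)))
        (List.replicate nn (0 : Int))) (rowF 0 nn) = rowF t nn := by
  induction t with
  | zero =>
      have h0 : ((0 : Nat) : Int) + 1 = 1 := by norm_num
      rw [h0, PySem.List.pyRange_one_eq_nil (le_refl 1)]
      rfl
  | succ t ih =>
      have hsplit : PySem.List.pyRange 1 (((t + 1 : Nat) : Int) + 1) 1
          = PySem.List.pyRange 1 ((t : Int) + 1) 1 ++ [(t : Int) + 1] := by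
        have := PySem.List.pyRange_one_succ_right (a := 1) (b := (t : Int) + 1) (by omega)
        push_cast
        exact this
      rw [hsplit, List.foldl_append, ih]
      simp only [List.foldl_cons, List.foldl_nil]
      rw [foldl_set_range]
      exact step_rowF nn t

lemma eulerian_poly_eq_rowF (nn : Nat) (h : 1 ≤ nn) :
    eulerian_poly (nn : Int) = rowF (nn - 1) nn := by
  obtain ⟨t, rfl⟩ : ∃ t, nn = t + 1 := ⟨nn - 1, (Nat.succ_pred_eq_of_pos h).symm⟩
  unfold eulerian_poly
  simp only [Int.toNat_natCast]
  rw [init_rowF]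
  rw [show PySem.List.pyRange 1 ((t + 1 : Nat) : Int) 1 = PySem.List.pyRange 1 ((t : Int) + 1) 1 by push_cast; ring_nf]
  have := outer_fold (t + 1) t
  simpa using this

lemma getD_map_range_int (f : Nat → Int) (L t : Nat) (h : t < L) :
    PySem.List.pyGetD ((List.range L).map (fun j : Nat => f j)) ((t : Nat) : Int) 0 = f t := by
  rw [PySem.List.pyGetD_natCast, List.getD_eq_getElem?_getD]
  simp [h]

lemma Wsum_one (a e : Nat) (B : Int) : Wsum a e 1 B = B ^ e := by
  unfold Wsum
  simp

lemma Wsum_zero_a (e L : Nat) (B : Int) : Wsum 0 e (L + 1) B = B ^ e := by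
  unfold Wsum
  rw [Finset.sum_range_succ' (fun j => (-1) ^ j * (Nat.choose 0 j : Int) * (B - j) ^ e) L]
  rw [Finset.sum_eq_zero (by intro x _; simp [Nat.choose_eq_zero_of_lt])]
  simp

lemma set_map_range (f : Nat → Int) (nn s : Nat) (v : Int) :
    ((List.range nn).map (fun k : Nat => f k)).set s v
      = (List.range nn).map (fun k : Nat => if k = s then v else f k) := by
  apply List.ext_getElem
  · simp
  · intro i h1 h2
    simp only [List.length_set, List.length_map, List.length_range] at h1
    rw [List.getElem_set]
    simp only [List.getElem_map, List.getElem_range]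
    split_ifs with ha hb hb <;> first | rfl | omega

-- one right-to-left pass 'for i in range(s, 0, -1): c[i] -= c[i-1]' differences the tail above 0
lemma diff_pass (g : Nat → Int) (nn : Nat) : ∀ (s : Nat), s < nn →
    (PySem.List.pyRange ((s : Nat) : Int) 0 (-1)).foldl
      (fun c i => c.set i.toNat (PySem.List.pyGetD c i 0 - PySem.List.pyGetD c (i - 1) 0))
      ((List.range nn).map (fun k : Nat => if k ≤ s then g k else g k - g (k - 1)))
    = (List.range nn).map (fun k : Nat => if k ≤ 0 then g 0 else g k - g (k - 1)) := by
  intro s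
  induction s with
  | zero =>
      intro _
      rw [PySem.List.pyRange_neg_one_eq_nil (by norm_num)]
      simp only [List.foldl_nil]
      apply List.map_congr_left
      intro k _
      rcases Nat.eq_zero_or_pos k with hk | hk
      · simp [hk]
      · rw [if_neg (by omega), if_neg (by omega)]
  | succ s ih =>
      intro hs
      rw [PySem.List.pyRange_neg_one_cons (by positivity)]
      simp only [List.foldl_cons]
      rw [show ((s + 1 : Nat) : Int) - 1 = ((s : Nat) : Int) from by push_cast; ring]
      rw [getD_map_range_int _ nn (s + 1) hs, getD_map_range_int _ nn s (by omega)]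
      rw [show ((s + 1 : Nat) : Int).toNat = s + 1 from by omega]
      rw [if_pos (le_refl (s + 1)), if_pos (by omega : s ≤ s + 1)]
      rw [set_map_range]
      have hfun : (List.range nn).map (fun k : Nat =>
          if k = s + 1 then g (s + 1) - g s else if k ≤ s + 1 then g k else g k - g (k - 1))
          = (List.range nn).map (fun k : Nat => if k ≤ s then g k else g k - g (k - 1)) := by
        apply List.map_congr_left
        intro k _
        rcases Nat.lt_trichotomy k (s + 1) with hk | hk | hk
        · rw [if_neg (by omega), if_pos (by omega), if_pos (by omega)]
        · rw [if_pos hk, if_neg (by omega)]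
          subst hk
          simp
        · rw [if_neg (by omega), if_neg (by omega), if_neg (by omega)]
      rw [hfun]
      exact ih (by omega)

-- one full pass maps the t-fold difference row to the (t+1)-fold one
lemma pass_step (nn t : Nat) (h : 1 ≤ nn) :
    (PySem.List.pyRange ((nn : Int) - 1) 0 (-1)).foldl
      (fun c i => c.set i.toNat (PySem.List.pyGetD c i 0 - PySem.List.pyGetD c (i - 1) 0))
      ((List.range nn).map (fun k : Nat => Wsum t (nn - 1) (k + 1) ((k : Int) + 1)))
    = (List.range nn).map (fun k : Nat => Wsum (t + 1) (nn - 1) (k + 1) ((k : Int) + 1)) := by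
  have hstart : (List.range nn).map (fun k : Nat => Wsum t (nn - 1) (k + 1) ((k : Int) + 1))
      = (List.range nn).map (fun k : Nat => if k ≤ nn - 1 then Wsum t (nn - 1) (k + 1) ((k : Int) + 1)
          else Wsum t (nn - 1) (k + 1) ((k : Int) + 1) - Wsum t (nn - 1) ((k - 1) + 1) (((k - 1 : Nat) : Int) + 1)) := by
    apply List.map_congr_left
    intro k hk
    rw [if_pos (by have := List.mem_range.mp hk; omega)]
  rw [hstart, show ((nn : Int) - 1) = ((nn - 1 : Nat) : Int) from by omega]
  rw [diff_pass (fun k : Nat => Wsum t (nn - 1) (k + 1) ((k : Int) + 1)) nn (nn - 1) (by omega)]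
  apply List.map_congr_left
  intro k _
  cases k with
  | zero =>
      rw [if_pos (le_refl 0)]
      rw [Wsum_one, Wsum_one]
  | succ k' =>
      rw [if_neg (by omega)]
      simp only [Nat.add_sub_cancel]
      have hW := Wsum_succ_a t (nn - 1) (k' + 1) (((k' + 1 : Nat) : Int) + 1)
      rw [show (((k' + 1 : Nat) : Int) + 1) - 1 = ((k' : Nat) : Int) + 1 from by push_cast; ring] at hW
      exact hW.symm

-- the outer 'for _ in range(n)' iterates the pass t times
lemma alt_outer (nn : Nat) (h : 1 ≤ nn) : ∀ (t : Nat),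
    (PySem.List.pyRange 0 ((t : Nat) : Int) 1).foldl (fun c _ =>
      (PySem.List.pyRange ((nn : Int) - 1) 0 (-1)).foldl
        (fun c i => c.set i.toNat (PySem.List.pyGetD c i 0 - PySem.List.pyGetD c (i - 1) 0)) c)
      ((List.range nn).map (fun k : Nat => Wsum 0 (nn - 1) (k + 1) ((k : Int) + 1)))
    = (List.range nn).map (fun k : Nat => Wsum t (nn - 1) (k + 1) ((k : Int) + 1)) := by
  intro t
  induction t with
  | zero =>
      rw [show ((0 : Nat) : Int) = 0 from rfl, PySem.List.pyRange_one_eq_nil (le_refl 0)]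
      rfl
  | succ t ih =>
      rw [show ((t + 1 : Nat) : Int) = ((t : Nat) : Int) + 1 from by push_cast; ring]
      rw [PySem.List.pyRange_one_succ_right (by positivity), List.foldl_append, ih]
      simp only [List.foldl_cons, List.foldl_nil]
      exact pass_step nn t h

lemma eulerian_poly_alt_eq_rowF (nn : Nat) (h : 1 ≤ nn) :
    eulerian_poly_alt (nn : Int) = rowF (nn - 1) nn := by
  unfold eulerian_poly_alt
  have htn : ((nn : Int) - 1).toNat = nn - 1 := by omega
  simp only [htn]
  have hpows : (PySem.List.pyRange 0 ((nn : Int)) 1).foldl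
      (fun ps p => ps ++ [(p + 1) ^ (nn - 1)]) ([] : List Int)
      = (List.range nn).map (fun k : Nat => Wsum 0 (nn - 1) (k + 1) ((k : Int) + 1)) := by
    rw [PySem.List.foldl_append_singleton_eq_map, PySem.List.pyRange_zero_natCast, List.map_map]
    simp only [List.nil_append, Function.comp_def]
    apply List.map_congr_left
    intro k _
    rw [Wsum_zero_a]
  rw [hpows, alt_outer nn h nn]
  conv_rhs => rw [rowF]
  apply List.map_congr_left
  intro k _
  unfold S
  rw [Nat.sub_add_cancel h]

-- ===== VERDICT (by name: the statement is the Claim_ definition above) =====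
theorem eulerian_poly_spec : Claim_equal_eulerian_poly := by
  intro n _ hpre
  unfold Spec_eulerian_poly
  have h1 : (1 : Int) ≤ n := hpre
  obtain ⟨nn, rfl⟩ : ∃ nn : Nat, n = (nn : Int) := ⟨n.toNat, (Int.toNat_of_nonneg (by omega)).symm⟩
  have hnn : 1 ≤ nn := by exact_mod_cast h1
  rw [eulerian_poly_eq_rowF nn hnn, eulerian_poly_alt_eq_rowF nn hnn]
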